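-- pv_equiv track=rewrite | github.com/HawkV/VN-localisation | main.py | localise_titles
-- ===== SOURCE A (Python) =====
-- from typing import Union, Callable, Iterable, Mapping
-- import itertools
--
-- def join_file_contents(src: Mapping[str, Iterable[str]]) -> Iterable[str]:
--     return itertools.chain(*src.values())
--
-- def localise_titles(src: Mapping[str, Iterable[str]]) -> Iterable[str]:
--     src_lines = join_file_contents(src)
--
--     title_names = {
--         'e': 'Empires',
--         'k': 'Kingdoms',
--         'd': 'Duchies',
--         'c': 'Counties',
--         'b': 'Baronies',
--         'cn': 'Cultural names',
--     }
--     title_types = title_names.keys()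
--     prefixes = tuple("{0}_".format(title_type) for title_type in title_types)
--
--     words = []
--
--     for line in src_lines:
--         words.extend(word for word in line.split(' ') if word.startswith(prefixes))
--
--     words = [word.split('_', 1) for word in set(words)]
--
--     title_groups = {}
--
--     result = []
--
--     for word in words:
--         title_type = word[0]
--         title_name = word[1]
--
--         if title_type not in title_groups.keys():
--             title_groups[title_type] = []
--
--         title_groups[title_type].append(title_name)
--
--     for title_type in title_types:
--         if title_type not in title_groups:
--             continue
--
--         title_collection = []
--
--         for title in title_groups[title_type]:
--             title_id = '{0}_{1}'.format(title_type, title)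
--             localised_title = title.replace('_', ' ').title()  # capitalise and replace underscores
--
--             title_collection.append('{0}: "{1}"'.format(title_id, localised_title))
--
--         result.append('#{0}'.format(title_names[title_type]))
--         result.extend(sorted(title_collection))
--
--     return result
-- ===== SOURCE B (Python) =====
-- def localise_titles(src):
--     title_names = [('e', 'Empires'), ('k', 'Kingdoms'), ('d', 'Duchies'),
--                    ('c', 'Counties'), ('b', 'Baronies'), ('cn', 'Cultural names')]
--     prefixes = tuple(t + '_' for t, _ in title_names)
--
--     words = set()
--     for lines in src.values():
--         for line in lines:
--             for word in line.split(' '):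
--                 if word.startswith(prefixes):
--                     words.add(word)
--
--     result = []
--     for title_type, display in title_names:
--         prefix = title_type + '_'
--         entries = sorted('{0}: "{1}"'.format(word, word[len(prefix):].replace('_', ' ').title())
--                          for word in words if word.startswith(prefix))
--         if entries:
--             result.append('#' + display)
--             result.extend(entries)
--     return result
-- ===== Notes on version B (the rewrite author's own statement) =====
-- stated objective: simpler
-- what changed: B drops A's split-every-word / group-into-dict pipeline: it builds one deduped set of prefix-matching words in a single pass and then, per title type, does a filtered scan of that set, keeping the whole word as the title id instead of splitting it apart and re-joining it.
import Mathlib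
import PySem

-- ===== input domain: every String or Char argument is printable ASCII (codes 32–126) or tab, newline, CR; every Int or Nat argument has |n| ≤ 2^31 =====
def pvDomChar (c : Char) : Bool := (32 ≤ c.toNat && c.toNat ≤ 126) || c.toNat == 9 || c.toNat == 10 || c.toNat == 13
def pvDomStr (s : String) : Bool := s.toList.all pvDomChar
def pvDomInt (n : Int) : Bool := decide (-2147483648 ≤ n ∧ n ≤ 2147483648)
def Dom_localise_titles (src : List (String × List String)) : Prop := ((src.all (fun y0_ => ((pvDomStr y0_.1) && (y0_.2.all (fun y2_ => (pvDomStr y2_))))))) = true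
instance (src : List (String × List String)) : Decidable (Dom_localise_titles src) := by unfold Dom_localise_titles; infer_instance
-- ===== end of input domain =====

-- B replaces A's split-every-word / group-into-dict pipeline by one deduped set of matching
-- words and, per title type, a filtered scan of that set (objective: simpler).
-- Note on the ports: both Pythons iterate over a set only to feed per-group `sorted`, so the
-- iteration order is unobservable in the result; the ports use first-insertion order.

-- the title_names table (shared literal data of both programs)
def pvTypeNames : List (String × String) :=
  [("e", "Empires"), ("k", "Kingdoms"), ("d", "Duchies"),
   ("c", "Counties"), ("b", "Baronies"), ("cn", "Cultural names")]

-- hand port of str.title(), exact on ASCII: an alphabetic char is uppercased after a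
-- non-alphabetic char and lowercased otherwise (used identically by both Pythons)
def pyTitleAux : Bool → List Char → List Char
  | _, [] => []
  | prev, c :: rest =>
    (if PySem.Chars.isalpha c then
      (if prev then PySem.Chars.lowerChar c else PySem.Chars.upperChar c) else c)
      :: pyTitleAux (PySem.Chars.isalpha c) rest

def pyTitle (s : String) : String := String.ofList (pyTitleAux false s.toList)

-- ===== PORT A =====
-- one grouping step of A: the word has already been split once at '_'; the pyGet? defaults
-- are unreachable (every collected word contains '_', so the split has two parts)
def pvA_step (d : PySem.Dict String (List String)) (parts : List String) :
    PySem.Dict String (List String) :=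
  let tt := (PySem.List.pyGet? parts 0).getD ""
  let tn := (PySem.List.pyGet? parts 1).getD ""
  let d := if d.contains tt then d else d.insert tt []
  d.modify tt [] (fun g => g ++ [tn])

def localise_titles (src : List (String × List String)) : List String :=
  let src_lines := src.foldl (fun acc kv => acc ++ kv.2) []
  let title_names : PySem.Dict String String := PySem.Dict.ofList pvTypeNames
  let prefixes := title_names.keys.map (fun t => t ++ "_")
  let words := src_lines.foldl (fun acc line =>
      acc ++ ((PySem.Str.split? line " ").getD []).filter
        (fun w => prefixes.any (fun p => PySem.Str.startswith w p))) []
  let words2 := (PySem.Set.ofList words).map (fun w => (PySem.Str.splitMax? w "_" 1).getD [])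
  let title_groups := words2.foldl pvA_step PySem.Dict.empty
  title_names.keys.foldl (fun res tt =>
      match title_groups.get? tt with
      | none => res
      | some group =>
        let coll := group.map (fun title =>
          (tt ++ "_" ++ title) ++ ": \"" ++ pyTitle (PySem.Str.replace title "_" " ") ++ "\"")
        (res ++ ["#" ++ title_names.getD tt ""]) ++ PySem.List.sorted coll (fun x => x) false) []

-- ===== PORT B =====
def localise_titles_alt (src : List (String × List String)) : List String :=
  let prefixes := pvTypeNames.map (fun p => p.1 ++ "_")
  let words : PySem.Set String := src.foldl (fun s kv =>
      kv.2.foldl (fun s line =>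
        ((PySem.Str.split? line " ").getD []).foldl (fun s w =>
          if prefixes.any (fun p => PySem.Str.startswith w p) then PySem.Set.add s w else s) s) s)
    PySem.Set.empty
  pvTypeNames.foldl (fun res td =>
      let pre := td.1 ++ "_"
      let entries := PySem.List.sorted
        ((words.filter (fun w => PySem.Str.startswith w pre)).map (fun w =>
          w ++ ": \"" ++ pyTitle (PySem.Str.replace
            (PySem.Str.slice w (some (PySem.Str.len pre)) none) "_" " ") ++ "\""))
        (fun x => x) false
      if entries.isEmpty then res else (res ++ ["#" ++ td.2]) ++ entries) []

-- ===== PRECONDITION & SPEC =====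
def Spec_localise_titles (src : List (String × List String)) (out : List String) : Prop := out = localise_titles_alt src
instance (src : List (String × List String)) (out : List String) : Decidable (Spec_localise_titles src out) := by unfold Spec_localise_titles; infer_instance

-- ===== CLAIM (what is proved, stated in full; the proofs are below) =====
def Claim_equal_localise_titles : Prop := ∀ (src : List (String × List String)), Dom_localise_titles src → Spec_localise_titles src (localise_titles src)

-- ===== LEMMAS AND PROOFS =====

-- the word filter, the per-type membership test and the per-type prefix strip
def pvM (w : String) : Bool :=
  (["e_", "k_", "d_", "c_", "b_", "cn_"] : List String).any (fun p => PySem.Str.startswith w p)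

def pvP (t w : String) : Bool := PySem.Str.startswith w (t ++ "_")

def pvStrip (t w : String) : String :=
  PySem.Str.slice w (some (PySem.Str.len (t ++ "_"))) none

-- A's collected word list, as a flatMap
def pvWordsA (src : List (String × List String)) : List String :=
  (src.flatMap (fun kv => kv.2)).flatMap (fun line =>
    ((PySem.Str.split? line " ").getD []).filter pvM)

lemma pvWordsA_spec (src : List (String × List String)) :
    (src.foldl (fun acc kv => acc ++ kv.2) []).foldl (fun acc line =>
      acc ++ ((PySem.Str.split? line " ").getD []).filter
        (fun w => (["e_", "k_", "d_", "c_", "b_", "cn_"] : List String).any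
          (fun p => PySem.Str.startswith w p))) [] = pvWordsA src := by
  rw [PySem.List.foldl_append_eq_flatMap, PySem.List.foldl_append_eq_flatMap]
  simp only [List.nil_append]
  rfl

lemma pvFoldAdd {α : Type} (g : α → List String) : ∀ (l : List α) (s : PySem.Set String),
    l.foldl (fun s x => (g x).foldl PySem.Set.add s) s
      = (l.flatMap g).foldl PySem.Set.add s := by
  intro l
  induction l with
  | nil => simp
  | cons x xs ih => intro s; simp [List.foldl_append, ih]

lemma pvWordsB_spec (src : List (String × List String)) :
    src.foldl (fun s kv =>
      kv.2.foldl (fun s line =>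
        ((PySem.Str.split? line " ").getD []).foldl (fun s w =>
          if (["e_", "k_", "d_", "c_", "b_", "cn_"] : List String).any
              (fun p => PySem.Str.startswith w p) = true
          then PySem.Set.add s w else s) s) s) PySem.Set.empty
    = PySem.Set.ofList (pvWordsA src) := by
  simp only [PySem.List.foldl_if_eq_foldl_filter]
  simp only [pvFoldAdd]
  rw [PySem.Set.ofList_eq_foldl, pvWordsA, List.flatMap_assoc]
  rfl

-- splitOnMax.go bookkeeping (computing word.split('_', 1) on a word of shape t ++ '_' ++ rest)
lemma pvGo_zero (l cur : List Char) (acc : List (List Char)) (sep : List Char) (fuel : Nat) :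
    PySem.Chars.splitOnMax.go sep fuel 0 l cur acc = ((cur.reverse ++ l) :: acc).reverse := by
  cases fuel <;> cases l <;> simp [PySem.Chars.splitOnMax.go]

lemma pvGo_step (fuel m : Nat) (c : Char) (l cur : List Char) (acc : List (List Char))
    (h : c ≠ '_') :
    PySem.Chars.splitOnMax.go ['_'] (fuel+1) (m+1) (c::l) cur acc
      = PySem.Chars.splitOnMax.go ['_'] fuel (m+1) l (c::cur) acc := by
  simp [PySem.Chars.splitOnMax.go, List.isPrefixOf, Ne.symm h]

lemma pvGo_hit (fuel m : Nat) (l cur : List Char) (acc : List (List Char)) :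
    PySem.Chars.splitOnMax.go ['_'] (fuel+1) (m+1) ('_'::l) cur acc
      = PySem.Chars.splitOnMax.go ['_'] fuel m l [] (cur.reverse :: acc) := by
  simp [PySem.Chars.splitOnMax.go, List.isPrefixOf]

lemma pvGo_scan (tc : List Char) (h : '_' ∉ tc) :
    ∀ (fuel : Nat) (rest cur : List Char) (acc : List (List Char)),
      tc.length + rest.length + 2 ≤ fuel →
      PySem.Chars.splitOnMax.go ['_'] fuel 1 (tc ++ '_' :: rest) cur acc
        = (rest :: (cur.reverse ++ tc) :: acc).reverse := by
  induction tc with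
  | nil =>
    intro fuel rest cur acc hf
    match fuel, hf with
    | fuel+2, _ =>
      rw [List.nil_append, pvGo_hit fuel.succ 0, pvGo_zero]
      simp
  | cons c tcs ih =>
    intro fuel rest cur acc hf
    match fuel, hf with
    | fuel+1, hf =>
      have hc : c ≠ '_' := fun hc => h (hc ▸ List.mem_cons_self)
      rw [List.cons_append, pvGo_step fuel 0 c _ _ _ hc,
        ih (fun hm => h (List.mem_cons_of_mem _ hm)) fuel rest (c::cur) acc (by
          simp at hf ⊢; omega)]
      simp

lemma pvSplit_spec (w t : String) (rest : List Char)
    (ht : t ∈ (["e", "k", "d", "c", "b", "cn"] : List String))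
    (hw : w.toList = t.toList ++ '_' :: rest) :
    (PySem.Str.splitMax? w "_" 1).getD [] = [t, String.ofList rest] := by
  have hnu : '_' ∉ t.toList := by fin_cases ht <;> decide
  have hgo := pvGo_scan t.toList hnu (w.toList.length + 1) rest [] [] (by rw [hw]; simp)
  rw [PySem.Str.splitMax?]
  rw [show ("_" : String).toList = ['_'] from by decide, PySem.Chars.splitMax?]
  simp only [List.isEmpty_cons]
  rw [PySem.Chars.splitOnMax, if_neg (by norm_num), hw]
  simp only [Int.toNat_one]
  rw [show (t.toList ++ '_' :: rest).length + 1 = w.toList.length + 1 by rw [hw]]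
  rw [hgo]
  simp [String.ofList_toList]

-- canonical decomposition of a collected word: it starts with exactly one of the six
-- prefixes, and that prefix's type is what split('_', 1) yields
lemma pvWord_shape (w : String) (hw : pvM w = true) :
    ∃ t rest, t ∈ (["e", "k", "d", "c", "b", "cn"] : List String) ∧
      w.toList = t.toList ++ '_' :: rest ∧
      (∀ t' ∈ (["e", "k", "d", "c", "b", "cn"] : List String),
        (pvP t' w = true ↔ t' = t)) := by
  have h1 : ("e" ++ "_" : String).toList = ['e','_'] := by decide
  have h2 : ("k" ++ "_" : String).toList = ['k','_'] := by decide
  have h3 : ("d" ++ "_" : String).toList = ['d','_'] := by decide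
  have h4 : ("c" ++ "_" : String).toList = ['c','_'] := by decide
  have h5 : ("b" ++ "_" : String).toList = ['b','_'] := by decide
  have h6 : ("cn" ++ "_" : String).toList = ['c','n','_'] := by decide
  simp only [pvM, List.any_eq_true, List.mem_cons, List.not_mem_nil, or_false] at hw
  obtain ⟨p, hp, hsw⟩ := hw
  rw [PySem.Str.startswith_eq, PySem.Chars.startswith_iff] at hsw
  rcases hp with rfl|rfl|rfl|rfl|rfl|rfl
  · obtain ⟨rest, hrest⟩ := hsw
    rw [show ("e_" : String).toList = ['e','_'] from by decide] at hrest
    refine ⟨"e", rest, by decide, by simpa using hrest.symm, ?_⟩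
    intro t' ht'
    fin_cases ht' <;>
      simp only [pvP, PySem.Str.startswith_eq, PySem.Chars.startswith_iff,
        h1, h2, h3, h4, h5, h6, ← hrest] <;>
      simp [List.cons_prefix_cons]
  · obtain ⟨rest, hrest⟩ := hsw
    rw [show ("k_" : String).toList = ['k','_'] from by decide] at hrest
    refine ⟨"k", rest, by decide, by simpa using hrest.symm, ?_⟩
    intro t' ht'
    fin_cases ht' <;>
      simp only [pvP, PySem.Str.startswith_eq, PySem.Chars.startswith_iff,
        h1, h2, h3, h4, h5, h6, ← hrest] <;>
      simp [List.cons_prefix_cons]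
  · obtain ⟨rest, hrest⟩ := hsw
    rw [show ("d_" : String).toList = ['d','_'] from by decide] at hrest
    refine ⟨"d", rest, by decide, by simpa using hrest.symm, ?_⟩
    intro t' ht'
    fin_cases ht' <;>
      simp only [pvP, PySem.Str.startswith_eq, PySem.Chars.startswith_iff,
        h1, h2, h3, h4, h5, h6, ← hrest] <;>
      simp [List.cons_prefix_cons]
  · obtain ⟨rest, hrest⟩ := hsw
    rw [show ("c_" : String).toList = ['c','_'] from by decide] at hrest
    refine ⟨"c", rest, by decide, by simpa using hrest.symm, ?_⟩
    intro t' ht'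
    fin_cases ht' <;>
      simp only [pvP, PySem.Str.startswith_eq, PySem.Chars.startswith_iff,
        h1, h2, h3, h4, h5, h6, ← hrest] <;>
      simp [List.cons_prefix_cons]
  · obtain ⟨rest, hrest⟩ := hsw
    rw [show ("b_" : String).toList = ['b','_'] from by decide] at hrest
    refine ⟨"b", rest, by decide, by simpa using hrest.symm, ?_⟩
    intro t' ht'
    fin_cases ht' <;>
      simp only [pvP, PySem.Str.startswith_eq, PySem.Chars.startswith_iff,
        h1, h2, h3, h4, h5, h6, ← hrest] <;>
      simp [List.cons_prefix_cons]
  · obtain ⟨rest, hrest⟩ := hsw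
    rw [show ("cn_" : String).toList = ['c','n','_'] from by decide] at hrest
    refine ⟨"cn", rest, by decide, by simpa using hrest.symm, ?_⟩
    intro t' ht'
    fin_cases ht' <;>
      simp only [pvP, PySem.Str.startswith_eq, PySem.Chars.startswith_iff,
        h1, h2, h3, h4, h5, h6, ← hrest] <;>
      simp [List.cons_prefix_cons]

lemma pvStrip_spec (t w : String) (rest : List Char)
    (hw : w.toList = t.toList ++ '_' :: rest) :
    pvStrip t w = String.ofList rest := by
  have h1 : (pvStrip t w).toList = rest := by
    rw [pvStrip, PySem.Str.toList_slice, PySem.Chars.slice_eq_listSlice,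
      PySem.Str.len_eq, PySem.List.slice_from _ (by positivity), hw]
    rw [show (t ++ "_" : String).toList = t.toList ++ ['_'] by simp]
    simp
    rw [show t.length + 1 = (t.toList ++ ['_']).length by simp]
    rw [show t.toList ++ '_' :: rest = (t.toList ++ ['_']) ++ rest by simp]
    exact List.drop_left
  rw [← h1, String.ofList_toList]

lemma pvJoin_spec (t w : String) (rest : List Char)
    (hw : w.toList = t.toList ++ '_' :: rest) :
    t ++ "_" ++ String.ofList rest = w := by
  have h : (t ++ "_" ++ String.ofList rest).toList = w.toList := by
    simp [String.toList_append, hw]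
  rw [← String.ofList_toList (s := t ++ "_" ++ String.ofList rest), h, String.ofList_toList]

-- one grouping step of A, in terms of contains / getD
lemma pvA_step_contains (d : PySem.Dict String (List String)) (t t' tn : String) :
    (pvA_step d [t', tn]).contains t = (t == t' || d.contains t) := by
  simp only [pvA_step, PySem.List.pyGet?, PySem.List.pyIdx?]
  norm_num
  by_cases h : d.contains t' <;>
    simp [h, PySem.Dict.contains_modify, PySem.Dict.contains_insert, Bool.or_assoc]

lemma pvA_step_getD (d : PySem.Dict String (List String)) (t t' tn : String) :
    (pvA_step d [t', tn]).getD t [] = if t = t' then d.getD t' [] ++ [tn] else d.getD t [] := by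
  simp only [pvA_step, PySem.List.pyGet?, PySem.List.pyIdx?]
  norm_num
  by_cases h : d.contains t'
  · simp [h, PySem.Dict.getD_modify]
  · simp [h, PySem.Dict.getD_modify, PySem.Dict.getD_insert]
    split_ifs with ht
    · subst ht; rw [PySem.Dict.getD_of_not_contains d [] (by simpa using h)]; simp
    · rfl

-- the grouping-dict invariant of A's fold
lemma pvGroups_inv (ws : List String) (hws : ∀ w ∈ ws, pvM w = true) (t : String)
    (ht : t ∈ (["e", "k", "d", "c", "b", "cn"] : List String))
    (d : PySem.Dict String (List String)) :
    ((ws.foldl (fun d w => pvA_step d ((PySem.Str.splitMax? w "_" 1).getD [])) d).contains t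
        = (d.contains t || !((ws.filter (pvP t)).isEmpty)))
    ∧ (ws.foldl (fun d w => pvA_step d ((PySem.Str.splitMax? w "_" 1).getD [])) d).getD t []
        = d.getD t [] ++ (ws.filter (pvP t)).map (pvStrip t) := by
  induction ws generalizing d with
  | nil => simp
  | cons w ws ih =>
    have hw := hws w List.mem_cons_self
    obtain ⟨t', rest, ht', hwtl, huniq⟩ := pvWord_shape w hw
    have hsplit := pvSplit_spec w t' rest ht' hwtl
    have hws' : ∀ x ∈ ws, pvM x = true := fun x hx => hws x (List.mem_cons_of_mem _ hx)
    rw [List.foldl_cons, hsplit]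
    obtain ⟨ihc, ihg⟩ := ih hws' (pvA_step d [t', String.ofList rest])
    by_cases hteq : t = t'
    · subst hteq
      have hpw : pvP t w = true := (huniq t ht).mpr rfl
      refine ⟨?_, ?_⟩
      · rw [ihc, pvA_step_contains]
        simp [List.filter_cons, hpw]
      · rw [ihg, pvA_step_getD]
        simp [List.filter_cons, hpw, pvStrip_spec t w rest hwtl]
    · have hpw : pvP t w = false := by
        by_cases h : pvP t w = true
        · exact absurd ((huniq t ht).mp h) hteq
        · simpa using h
      refine ⟨?_, ?_⟩
      · rw [ihc, pvA_step_contains]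
        simp [List.filter_cons, hpw, beq_eq_false_iff_ne.mpr hteq]
      · rw [ihg, pvA_step_getD, if_neg hteq]
        simp [List.filter_cons, hpw]

-- the per-type emission step of A equals that of B
lemma pvStep_eq (ws : List String) (hws : ∀ w ∈ ws, pvM w = true)
    (t nm : String) (htn : (t, nm) ∈ pvTypeNames) (res : List String) :
    (match ((ws.map (fun w => (PySem.Str.splitMax? w "_" 1).getD [])).foldl pvA_step
        PySem.Dict.empty).get? t with
      | none => res
      | some group =>
        (res ++ ["#" ++ (PySem.Dict.ofList pvTypeNames : PySem.Dict String String).getD t ""]) ++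
          PySem.List.sorted (group.map (fun title =>
            (t ++ "_" ++ title) ++ ": \"" ++ pyTitle (PySem.Str.replace title "_" " ") ++ "\""))
            (fun x => x) false)
    = (if (PySem.List.sorted
        ((ws.filter (fun w => PySem.Str.startswith w (t ++ "_"))).map (fun w =>
          w ++ ": \"" ++ pyTitle (PySem.Str.replace
            (PySem.Str.slice w (some (PySem.Str.len (t ++ "_"))) none) "_" " ") ++ "\""))
        (fun x => x) false).isEmpty
      then res
      else (res ++ ["#" ++ nm]) ++ PySem.List.sorted
        ((ws.filter (fun w => PySem.Str.startswith w (t ++ "_"))).map (fun w =>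
          w ++ ": \"" ++ pyTitle (PySem.Str.replace
            (PySem.Str.slice w (some (PySem.Str.len (t ++ "_"))) none) "_" " ") ++ "\""))
        (fun x => x) false) := by
  have ht : t ∈ (["e", "k", "d", "c", "b", "cn"] : List String) := by
    fin_cases htn <;> decide
  rw [List.foldl_map]
  obtain ⟨hc, hg⟩ := pvGroups_inv ws hws t ht PySem.Dict.empty
  have hPeq : (fun w => PySem.Str.startswith w (t ++ "_")) = pvP t := rfl
  rw [hPeq]
  by_cases hfil : (ws.filter (pvP t)).isEmpty
  · have hnil : ws.filter (pvP t) = [] := List.isEmpty_iff.mp hfil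
    have hnone : (ws.foldl (fun d w => pvA_step d ((PySem.Str.splitMax? w "_" 1).getD []))
        PySem.Dict.empty).get? t = none := by
      have hfalse : _ = false := hc.trans (by simp [hfil])
      rcases ho : (ws.foldl (fun d w => pvA_step d ((PySem.Str.splitMax? w "_" 1).getD []))
        PySem.Dict.empty).get? t with _ | v
      · rfl
      · rw [PySem.Dict.contains_eq_isSome_get?, ho] at hfalse; simp at hfalse
    rw [hnone, hnil]
    simp [(PySem.List.sorted_eq_nil_iff ([] : List String) (fun x => x) false).mpr rfl]
  · have hsome : (ws.foldl (fun d w => pvA_step d ((PySem.Str.splitMax? w "_" 1).getD []))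
        PySem.Dict.empty).get? t = some ((ws.filter (pvP t)).map (pvStrip t)) := by
      have hcs : _ = true := hc.trans (by simp [hfil])
      rw [PySem.Dict.contains_eq_isSome_get?] at hcs
      rcases ho : (ws.foldl (fun d w => pvA_step d ((PySem.Str.splitMax? w "_" 1).getD []))
        PySem.Dict.empty).get? t with _ | v
      · rw [ho] at hcs; simp at hcs
      · have hv : (ws.foldl (fun d w => pvA_step d ((PySem.Str.splitMax? w "_" 1).getD []))
            PySem.Dict.empty).getD t [] = v := PySem.Dict.getD_of_get?_eq_some _ [] ho
        rw [hg] at hv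
        simp only [PySem.Dict.getD_empty, List.nil_append] at hv
        rw [hv]
    rw [hsome]
    dsimp only
    have hmapeq : ((ws.filter (pvP t)).map (pvStrip t)).map (fun title =>
          (t ++ "_" ++ title) ++ ": \"" ++ pyTitle (PySem.Str.replace title "_" " ") ++ "\"")
        = (ws.filter (pvP t)).map (fun w =>
          w ++ ": \"" ++ pyTitle (PySem.Str.replace
            (PySem.Str.slice w (some (PySem.Str.len (t ++ "_"))) none) "_" " ") ++ "\"") := by
      rw [List.map_map]
      refine List.map_congr_left (fun w hwmem => ?_)
      have hp : pvP t w = true := (List.mem_filter.mp hwmem).2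
      rw [pvP, PySem.Str.startswith_eq, PySem.Chars.startswith_iff] at hp
      obtain ⟨rest0, hrest0⟩ := hp
      have hwtl : w.toList = t.toList ++ '_' :: rest0 := by
        rw [← hrest0]
        simp [String.toList_append]
      have hstrip : pvStrip t w = String.ofList rest0 := pvStrip_spec t w rest0 hwtl
      have hraw : PySem.Str.slice w (some (PySem.Str.len (t ++ "_"))) none
          = String.ofList rest0 := pvStrip_spec t w rest0 hwtl
      have hjoin : t ++ "_" ++ String.ofList rest0 = w := pvJoin_spec t w rest0 hwtl
      simp only [Function.comp_apply, hstrip, hraw, hjoin]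
    have hname : (PySem.Dict.ofList pvTypeNames : PySem.Dict String String).getD t "" = nm := by
      fin_cases htn <;> decide
    have hne : ((ws.filter (pvP t)).map (fun w =>
          w ++ ": \"" ++ pyTitle (PySem.Str.replace
            (PySem.Str.slice w (some (PySem.Str.len (t ++ "_"))) none) "_" " ") ++ "\"")) ≠ [] := by
      intro h
      exact hfil (List.isEmpty_iff.mpr (List.map_eq_nil_iff.mp h))
    have hne' : (PySem.List.sorted ((ws.filter (pvP t)).map (fun w =>
          w ++ ": \"" ++ pyTitle (PySem.Str.replace
            (PySem.Str.slice w (some (PySem.Str.len (t ++ "_"))) none) "_" " ") ++ "\""))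
        (fun x => x) false).isEmpty = false := by
      rw [Bool.eq_false_iff]
      intro hempty
      exact hne ((PySem.List.sorted_eq_nil_iff _ _ _).mp (List.isEmpty_iff.mp hempty))
    rw [hmapeq, hname, hne']
    simp

-- fold the six types on both sides
lemma pvFold_eq (ws : List String) (hws : ∀ w ∈ ws, pvM w = true) :
    ∀ (pairs : List (String × String)), (∀ p ∈ pairs, p ∈ pvTypeNames) → ∀ res : List String,
    pairs.foldl (fun res td =>
      match (((PySem.Set.ofList ws : List String).map
          (fun w => (PySem.Str.splitMax? w "_" 1).getD [])).foldl pvA_step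
          PySem.Dict.empty).get? td.1 with
      | none => res
      | some group =>
        (res ++ ["#" ++ (PySem.Dict.ofList pvTypeNames : PySem.Dict String String).getD td.1 ""]) ++
          PySem.List.sorted (group.map (fun title =>
            (td.1 ++ "_" ++ title) ++ ": \"" ++ pyTitle (PySem.Str.replace title "_" " ") ++ "\""))
            (fun x => x) false) res
    = pairs.foldl (fun res td =>
        if (PySem.List.sorted
            (((PySem.Set.ofList ws : List String).filter
              (fun w => PySem.Str.startswith w (td.1 ++ "_"))).map (fun w =>
              w ++ ": \"" ++ pyTitle (PySem.Str.replace
                (PySem.Str.slice w (some (PySem.Str.len (td.1 ++ "_"))) none) "_" " ") ++ "\""))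
            (fun x => x) false).isEmpty
        then res
        else (res ++ ["#" ++ td.2]) ++ PySem.List.sorted
            (((PySem.Set.ofList ws : List String).filter
              (fun w => PySem.Str.startswith w (td.1 ++ "_"))).map (fun w =>
              w ++ ": \"" ++ pyTitle (PySem.Str.replace
                (PySem.Str.slice w (some (PySem.Str.len (td.1 ++ "_"))) none) "_" " ") ++ "\""))
            (fun x => x) false) res := by
  have hws' : ∀ w ∈ (PySem.Set.ofList ws : List String), pvM w = true := fun w hw =>
    hws w ((PySem.Set.mem_ofList ws w).mp hw)
  intro pairs
  induction pairs with
  | nil => intro _ res; rfl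
  | cons p ps ih =>
    intro hp res
    rw [List.foldl_cons, List.foldl_cons]
    rw [pvStep_eq _ hws' p.1 p.2 (hp p List.mem_cons_self) res]
    exact ih (fun q hq => hp q (List.mem_cons_of_mem _ hq)) _

-- ===== VERDICT (by name: the statement is the Claim_ definition above) =====
theorem localise_titles_spec : Claim_equal_localise_titles := by
  intro src _hdom
  unfold Spec_localise_titles localise_titles localise_titles_alt
  have hkeys : (PySem.Dict.ofList pvTypeNames : PySem.Dict String String).keys
      = ["e", "k", "d", "c", "b", "cn"] := by decide
  have hpfxA : (["e", "k", "d", "c", "b", "cn"] : List String).map (fun t => t ++ "_")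
      = ["e_", "k_", "d_", "c_", "b_", "cn_"] := by decide
  have hpfxB : pvTypeNames.map (fun p => p.1 ++ "_")
      = ["e_", "k_", "d_", "c_", "b_", "cn_"] := by decide
  simp only [hkeys, hpfxA, hpfxB]
  simp only [pvWordsA_spec, pvWordsB_spec]
  rw [show (["e", "k", "d", "c", "b", "cn"] : List String) = pvTypeNames.map Prod.fst
    from by decide]
  rw [List.foldl_map]
  exact pvFold_eq (pvWordsA src) (by
    intro w hw
    simp only [pvWordsA, List.mem_flatMap, List.mem_filter] at hw
    obtain ⟨line, _, _, hm⟩ := hw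
    exact hm) pvTypeNames (fun p hp => hp) []
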